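-- pv_equiv track=rewrite | github.com/dclamage/equal-teams-solver | equal_teams_solver.py | find_equal_pair
-- ===== SOURCE A (Python) =====
-- from itertools import combinations
--
-- TEAMS_CACHE: dict[int, list[tuple[int, ...]]] = {}
--
-- def get_5_subsets(N: int) -> list[tuple[int, ...]]:
--     """Return (and cache) all 5-element subsets of range(N)."""
--     if N not in TEAMS_CACHE:
--         TEAMS_CACHE[N] = list(combinations(range(N), 5))
--     return TEAMS_CACHE[N]
--
-- def find_equal_pair(scores: list[int]) -> tuple[tuple[int, ...], tuple[int, ...]] | None:
--     """Return a disjoint pair of 5-element subsets with equal sum, or None."""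
--     by_sum: dict[int, list[tuple[int, ...]]] = {}
--     for T in get_5_subsets(len(scores)):
--         s = sum(scores[i] for i in T)
--         for U in by_sum.get(s, []):
--             if set(T).isdisjoint(U):
--                 return T, U
--         by_sum.setdefault(s, []).append(T)
--     return None
-- ===== SOURCE B (Python) =====
-- def find_equal_pair(scores):
--     """Return a disjoint pair of 5-element subsets with equal sum, or None."""
--     N = len(scores)
--     entries = []  # (sum, subset) pairs, subsets in lexicographic order
--     for a in range(N):
--         for b in range(a + 1, N):
--             for c in range(b + 1, N):
--                 for d in range(c + 1, N):
--                     for e in range(d + 1, N):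
--                         entries.append((scores[a] + scores[b] + scores[c]
--                                         + scores[d] + scores[e],
--                                         (a, b, c, d, e)))
--     for i, (s, T) in enumerate(entries):
--         for s2, U in entries[:i]:
--             if s2 == s and all(j not in T for j in U):
--                 return T, U
--     return None
-- ===== Notes on version B (the rewrite author's own statement) =====
-- stated objective: alternative
-- what changed: B replaces A's single pass with a by_sum dict by two stages: it first materialises all (sum, subset) pairs via five explicit nested index loops (no itertools, no dict), then scans each subset's earlier prefix entries[:i] for an equal-sum disjoint predecessor.
import Mathlib
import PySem

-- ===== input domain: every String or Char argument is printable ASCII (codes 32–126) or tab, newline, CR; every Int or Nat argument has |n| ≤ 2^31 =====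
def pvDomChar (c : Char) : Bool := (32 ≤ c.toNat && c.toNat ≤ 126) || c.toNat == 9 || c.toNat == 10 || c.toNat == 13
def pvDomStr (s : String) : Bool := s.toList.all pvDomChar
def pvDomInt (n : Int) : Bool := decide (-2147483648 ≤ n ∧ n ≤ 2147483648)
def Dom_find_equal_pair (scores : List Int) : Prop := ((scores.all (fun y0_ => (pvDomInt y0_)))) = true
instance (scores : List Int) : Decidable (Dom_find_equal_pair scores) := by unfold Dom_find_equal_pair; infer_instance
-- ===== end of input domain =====

-- B drops A's by_sum dict and itertools: it builds all (sum, subset) pairs with five nested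
-- index loops and then rescans each subset's earlier prefix for an equal-sum disjoint partner
-- (alternative decomposition, not faster).

-- ===== PORT A =====
-- itertools.combinations(elems, 5) in lexicographic order (A's get_5_subsets over range(N))
def pvCombs : Nat → List Int → List (List Int)
  | 0, _ => [[]]
  | _ + 1, [] => []
  | k + 1, x :: xs => ((pvCombs k xs).map (fun t => x :: t)) ++ pvCombs (k + 1) xs

-- sum(scores[i] for i in T); indices come from range(len(scores)), so pyGetD is exact here
def pvSumIdx (scores : List Int) (T : List Int) : Int :=
  T.foldl (fun acc j => acc + PySem.List.pyGetD scores j 0) 0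

-- set(T).isdisjoint(U)
def pvDisjoint (T U : List Int) : Bool := T.all (fun i => !(U.contains i))

-- the 'for T in …' loop of A, with the by_sum dict as loop state
def pvFindA (scores : List Int) : List (List Int) → PySem.Dict Int (List (List Int)) → Option (List Int × List Int)
  | [], _ => none
  | T :: rest, bySum =>
    match (bySum.getD (pvSumIdx scores T) []).find? (fun U => pvDisjoint T U) with
    | some U => some (T, U)
    | none =>
        pvFindA scores rest
          (bySum.insert (pvSumIdx scores T) (bySum.getD (pvSumIdx scores T) [] ++ [T]))

def find_equal_pair (scores : List Int) : Option (List Int × List Int) :=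
  pvFindA scores (pvCombs 5 (PySem.List.pyRange 0 (scores.length : Int) 1)) PySem.Dict.empty

-- ===== PORT B =====
-- B's first stage: the five nested 'for' loops appending (sum, subset) pairs
-- (the indices a<b<c<d<e all lie in range(N), so pyGetD is exact here)
def pvEntB (scores : List Int) : List (Int × List Int) :=
  (PySem.List.pyRange 0 (scores.length : Int) 1).flatMap (fun a =>
    (PySem.List.pyRange (a + 1) (scores.length : Int) 1).flatMap (fun b =>
      (PySem.List.pyRange (b + 1) (scores.length : Int) 1).flatMap (fun c =>
        (PySem.List.pyRange (c + 1) (scores.length : Int) 1).flatMap (fun d =>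
          (PySem.List.pyRange (d + 1) (scores.length : Int) 1).map (fun e =>
            (PySem.List.pyGetD scores a 0 + PySem.List.pyGetD scores b 0
              + PySem.List.pyGetD scores c 0 + PySem.List.pyGetD scores d 0
              + PySem.List.pyGetD scores e 0,
             [a, b, c, d, e]))))))

-- B's second stage: 'for i, (s, T) in enumerate(entries): for s2, U in entries[:i]: …'
def find_equal_pair_alt (scores : List Int) : Option (List Int × List Int) :=
  let entries := pvEntB scores
  (PySem.List.enumerate entries 0).findSome? (fun p =>
    match (PySem.List.slice entries none (some p.1)).find?
        (fun q => q.1 == p.2.1 && q.2.all (fun j => !(p.2.2.contains j))) with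
    | some q => some (p.2.2, q.2)
    | none => none)

-- ===== PRECONDITION & SPEC =====
def Spec_find_equal_pair (scores : List Int) (out : Option (List Int × List Int)) : Prop := out = find_equal_pair_alt scores
instance (scores : List Int) (out : Option (List Int × List Int)) : Decidable (Spec_find_equal_pair scores out) := by unfold Spec_find_equal_pair; infer_instance

-- ===== CLAIM (what is proved, stated in full; the proofs are below) =====
def Claim_equal_find_equal_pair : Prop := ∀ (scores : List Int), Dom_find_equal_pair scores → Spec_find_equal_pair scores (find_equal_pair scores)

-- ===== LEMMAS AND PROOFS =====

-- the (sum, subset) tag both programs agree on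
def pvTag (scores : List Int) (T : List Int) : Int × List Int := (pvSumIdx scores T, T)

-- proof-side middle ground: scan of the remaining (sum, subset) pairs carrying the scanned prefix
def pvAux : List (Int × List Int) → List (Int × List Int) → Option (List Int × List Int)
  | [], _ => none
  | (s, T) :: rest, prev =>
    match prev.find? (fun q => q.1 == s && q.2.all (fun j => !(T.contains j))) with
    | some q => some (T, q.2)
    | none => pvAux rest (prev ++ [(s, T)])

-- proof-side recursive view of B's five nested index loops
def pvNest {α : Type} (scores : List Int) (N : Int) : Nat → Int → Int → (Int → List Int → α) → List α
  | 0, _, s, f => [f s []]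
  | k + 1, a, s, f =>
      (PySem.List.pyRange a N 1).flatMap (fun x =>
        pvNest scores N k (x + 1) (s + PySem.List.pyGetD scores x 0) (fun s' t => f s' (x :: t)))

theorem find?_filter' {α : Type} (l : List α) (q p : α → Bool) :
    (l.filter q).find? p = l.find? (fun x => q x && p x) := by
  induction l with
  | nil => rfl
  | cons x xs ih =>
    simp only [List.filter_cons]
    by_cases hq : q x = true
    · rw [if_pos hq]
      by_cases hp : p x = true <;> simp [hq, hp, ih]
    · simp only [Bool.not_eq_true] at hq
      simp [hq, ih]

theorem all_not_contains_comm (T U : List Int) :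
    T.all (fun i => !(U.contains i)) = U.all (fun j => !(T.contains j)) := by
  rw [Bool.eq_iff_iff]
  simp only [List.all_eq_true, Bool.not_eq_true', List.contains_eq_mem, decide_eq_false_iff_not]
  constructor <;> intro h x hx hy <;> exact h _ hy hx

-- A's dict loop computes pvAux on the tagged subsets
theorem pvFindA_eq_aux (scores : List Int) (combs : List (List Int)) :
    ∀ (prev : List (List Int)) (d : PySem.Dict Int (List (List Int))),
      (∀ s, d.getD s [] = prev.filter (fun U => pvSumIdx scores U == s)) →
      pvFindA scores combs d = pvAux (combs.map (pvTag scores)) (prev.map (pvTag scores)) := by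
  induction combs with
  | nil => intro prev d _; rfl
  | cons T rest ih =>
    intro prev d h
    simp only [pvFindA, List.map_cons, pvTag, pvAux]
    rw [h, find?_filter', List.find?_map]
    have hpred : ((fun q : Int × List Int => q.1 == pvSumIdx scores T
          && q.2.all (fun j => !(T.contains j))) ∘ (pvTag scores))
        = (fun U => (pvSumIdx scores U == pvSumIdx scores T) && pvDisjoint T U) := by
      funext U
      simp only [Function.comp, pvTag, pvDisjoint]
      rw [all_not_contains_comm T U]
    rw [hpred]
    cases hfind : prev.find? (fun U => (pvSumIdx scores U == pvSumIdx scores T) && pvDisjoint T U) with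
    | some U => simp [pvTag]
    | none =>
      simp only [Option.map_none]
      have hm : (prev.map (pvTag scores)) ++ [(pvSumIdx scores T, T)]
          = (prev ++ [T]).map (pvTag scores) := by
        simp [pvTag]
      rw [hm]
      apply ih
      intro s
      rw [PySem.Dict.getD_insert]
      by_cases hs : s = pvSumIdx scores T
      · subst hs
        simp [List.filter_append]
      · simp only [if_neg hs]
        rw [h]
        have hfalse : (pvSumIdx scores T == s) = false := by
          simp [BEq.beq]; omega
        simp [List.filter_append, hfalse]

-- B's prefix scan computes pvAux: entries[:i] is exactly the already-scanned prefix
theorem scan_eq_aux :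
    ∀ (rest prev : List (Int × List Int)),
      (PySem.List.enumerate rest (prev.length : Int)).findSome? (fun p =>
        match (PySem.List.slice (prev ++ rest) none (some p.1)).find?
            (fun q => q.1 == p.2.1 && q.2.all (fun j => !(p.2.2.contains j))) with
        | some q => some (p.2.2, q.2)
        | none => none)
      = pvAux rest prev := by
  intro rest
  induction rest with
  | nil => intro prev; simp [PySem.List.enumerate_nil, pvAux]
  | cons hd rest ih =>
    intro prev
    obtain ⟨s, T⟩ := hd
    rw [PySem.List.enumerate_cons, List.findSome?_cons]
    have hsl : PySem.List.slice (prev ++ (s, T) :: rest) none (some ((prev.length : Nat) : Int))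
        = prev := by
      rw [PySem.List.slice_to _ (by positivity)]
      simp
    simp only [hsl]
    unfold pvAux
    cases hfind : prev.find? (fun q => q.1 == s && q.2.all (fun j => !(T.contains j))) with
    | some q => rfl
    | none =>
      have h1 : ((prev.length : Int) + 1) = (((prev ++ [(s, T)]).length : Nat) : Int) := by
        simp
      have h2 : prev ++ (s, T) :: rest = (prev ++ [(s, T)]) ++ rest := by
        simp
      rw [h1, h2]
      exact ih (prev ++ [(s, T)])

-- the nested loops of B enumerate pvCombs with the running sum folded in: the k+1 level
theorem pvNest_succ_eq {α : Type} (scores : List Int) (N : Int) (k : Nat)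
    (IH : ∀ (a s : Int) (f : Int → List Int → α),
      pvNest scores N k a s f
        = (pvCombs k (PySem.List.pyRange a N 1)).map
            (fun t => f (t.foldl (fun acc j => acc + PySem.List.pyGetD scores j 0) s) t)) :
    ∀ (n : Nat) (a : Int), (N - a).toNat = n → ∀ (s : Int) (f : Int → List Int → α),
      pvNest scores N (k + 1) a s f
        = (pvCombs (k + 1) (PySem.List.pyRange a N 1)).map
            (fun t => f (t.foldl (fun acc j => acc + PySem.List.pyGetD scores j 0) s) t) := by
  intro n
  induction n with
  | zero =>
    intro a ha s f
    have hle : N ≤ a := by omega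
    rw [pvNest, PySem.List.pyRange_one_eq_nil hle]
    simp [pvCombs]
  | succ n ihn =>
    intro a ha s f
    have hlt : a < N := by omega
    rw [pvNest, PySem.List.pyRange_one_cons hlt, List.flatMap_cons]
    have htail : (PySem.List.pyRange (a + 1) N 1).flatMap (fun x =>
        pvNest scores N k (x + 1) (s + PySem.List.pyGetD scores x 0) (fun s' t => f s' (x :: t)))
        = pvNest scores N (k + 1) (a + 1) s f := by
      rw [pvNest]
    rw [IH, htail, ihn (a + 1) (by omega) s f]
    show _ = (pvCombs (k + 1) (a :: PySem.List.pyRange (a + 1) N 1)).map _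
    rw [pvCombs]
    simp [List.map_map, Function.comp]

theorem pvNest_eq {α : Type} (scores : List Int) (N : Int) :
    ∀ (k : Nat) (a s : Int) (f : Int → List Int → α),
      pvNest scores N k a s f
        = (pvCombs k (PySem.List.pyRange a N 1)).map
            (fun t => f (t.foldl (fun acc j => acc + PySem.List.pyGetD scores j 0) s) t) := by
  intro k
  induction k with
  | zero => intro a s f; simp [pvNest, pvCombs]
  | succ k ih => intro a s f; exact pvNest_succ_eq scores N k ih ((N - a).toNat) a rfl s f

-- B's first stage produces exactly the tagged combinations
theorem pvEntB_eq (scores : List Int) :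
    pvEntB scores
      = (pvCombs 5 (PySem.List.pyRange 0 (scores.length : Int) 1)).map (pvTag scores) := by
  have h0 : pvEntB scores
      = pvNest scores (scores.length : Int) 5 0 0 (fun s t => (s, t)) := by
    simp [pvEntB, pvNest, ← List.map_eq_flatMap]
  rw [h0, pvNest_eq]
  rfl

-- ===== VERDICT (by name: the statement is the Claim_ definition above) =====
theorem find_equal_pair_spec : Claim_equal_find_equal_pair := by
  intro scores _
  unfold Spec_find_equal_pair find_equal_pair find_equal_pair_alt
  rw [pvEntB_eq]
  have hA := pvFindA_eq_aux scores
    (pvCombs 5 (PySem.List.pyRange 0 (scores.length : Int) 1)) [] PySem.Dict.empty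
    (by intro s; simp [PySem.Dict.getD_empty])
  have hB := scan_eq_aux
    ((pvCombs 5 (PySem.List.pyRange 0 (scores.length : Int) 1)).map (pvTag scores)) []
  simp only [List.nil_append, List.map_nil] at hA hB
  rw [hA]
  rw [← hB]
  rfl
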